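-- pv_equiv track=rewrite | github.com/yool-seoul/programmers_resolved | 84325.py | solution
-- ===== SOURCE A (Python) =====
-- def solution(table, languages, preference):
--     depts = dict()    # Contents, Game, Hardware, Portal, SI
--     score = []
--     for t in table:
--         a = t.split(' ')
--         depts[a[0]] = dict(zip(a[1:], [5, 4, 3, 2, 1]))
--
--     for dept in depts:
--         s = 0
--         for l, p in zip(languages, preference):
--             v = depts[dept].get(l)
--             s += (v * p) if v != None else 0
--         score.append((s, dept))
--
--     score.sort(key=lambda x: (-x[0], x[1]))   # sort by score and name
--     _, B = zip(*score)
--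
--     return B[0]
-- ===== SOURCE B (Python) =====
-- def solution(table, languages, preference):
--     # Scan the table backwards (a later row overrides an earlier one with the same
--     # department name), skip names already handled, score each kept row by a positional
--     # countdown over its first five listed languages, and keep a single running best.
--     best = None          # (score, name)
--     seen = set()
--     for row in reversed(table):
--         tokens = row.split(' ')
--         name = tokens[0]
--         if name in seen:
--             continue
--         seen.add(name)
--         listed = tokens[1:6]
--         s = 0
--         for lang, p in zip(languages, preference):
--             w = 0
--             k = 5
--             for tok in listed:
--                 if tok == lang:
--                     w = k
--                 k -= 1
--             s += w * p
--         if best is None or s > best[0] or (s == best[0] and name < best[1]):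
--             best = (s, name)
--     return best[1]
-- ===== Notes on version B (the rewrite author's own statement) =====
-- stated objective: alternative
-- what changed: B eliminates A's dict-of-dicts, its separate scoring pass and the final sort entirely: it scans the table backwards skipping department names already seen (so the last row for a name wins, as A's dict overwrite does), scores each kept row with a positional countdown over its listed languages instead of a language-to-weight dict, and keeps one running best (strictly higher score, or equal score with lexicographically smaller name), returning that name.
import Mathlib
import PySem

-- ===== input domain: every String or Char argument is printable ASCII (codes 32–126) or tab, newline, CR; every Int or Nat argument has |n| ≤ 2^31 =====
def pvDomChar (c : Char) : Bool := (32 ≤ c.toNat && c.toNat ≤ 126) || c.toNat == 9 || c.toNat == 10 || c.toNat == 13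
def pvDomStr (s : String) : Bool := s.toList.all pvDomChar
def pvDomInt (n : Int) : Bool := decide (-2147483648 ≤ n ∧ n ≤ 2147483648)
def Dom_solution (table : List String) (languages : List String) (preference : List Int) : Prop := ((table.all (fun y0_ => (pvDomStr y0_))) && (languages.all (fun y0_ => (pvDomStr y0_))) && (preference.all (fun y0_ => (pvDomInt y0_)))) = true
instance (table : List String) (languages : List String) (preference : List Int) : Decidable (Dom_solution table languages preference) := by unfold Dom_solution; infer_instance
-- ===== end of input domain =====

-- B drops A's dict-of-dicts, second scoring pass and final sort: one backward scan over the
-- table, skipping names already seen, a positional countdown for weights and a running best.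


-- ===== PORT A =====
-- t.split(' ') never returns an empty list, so a[0] is total: headD ""; sep " " is nonempty so split? is always some (getD []).
def solution (table : List String) (languages : List String) (preference : List Int) : String :=
  let depts : PySem.Dict String (PySem.Dict String Int) :=
    table.foldl (fun d t =>
      d.insert ((((PySem.Str.split? t " ").getD [])).headD "")
               (PySem.Dict.ofList (List.zip (((PySem.Str.split? t " ").getD [])).tail ([5, 4, 3, 2, 1] : List Int))))
      PySem.Dict.empty
  -- for dept in depts: depts[dept] always succeeds (dept ∈ keys), ported as getD with a dummy default
  let score : List (Int × String) :=
    depts.keys.foldl (fun sc dept =>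
      sc ++ [((List.zip languages preference).foldl (fun s lp =>
                s + (match (depts.getD dept PySem.Dict.empty).get? lp.1 with
                     | some v => v * lp.2
                     | none => 0)) 0, dept)]) []
  -- score.sort(key=lambda x: (-x[0], x[1])); return B[0]  (empty table raises in Python: outside Pre_)
  match PySem.List.sorted2 score (fun x => -x.1) (fun x => x.2) with
  | (_, b) :: _ => b
  | [] => ""

-- ===== PORT B =====
-- backward scan with a seen-set, countdown weights, one running best; best = None ported as Option
def solution_alt (table : List String) (languages : List String) (preference : List Int) : String :=
  let final :=
    table.reverse.foldl (fun (st : PySem.Set String × Option (Int × String)) row =>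
      let tokens := (PySem.Str.split? row " ").getD []
      let name := tokens.headD ""
      if PySem.Set.contains st.1 name then st
      else
        let listed := PySem.List.slice tokens (some 1) (some 6)
        let s : Int := (List.zip languages preference).foldl (fun s lp =>
          s + ((listed.foldl (fun (wk : Int × Int) tok =>
                  (if tok = lp.1 then wk.2 else wk.1, wk.2 - 1)) (0, 5)).1) * lp.2) 0
        (PySem.Set.add st.1 name,
         match st.2 with
         | none => some (s, name)
         | some (bs, bn) =>
             if s > bs ∨ (s = bs ∧ name < bn) then some (s, name) else some (bs, bn)))
      (PySem.Set.empty, none)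
  match final.2 with
  | some b => b.2
  | none => ""

-- ===== PRECONDITION & SPEC =====
-- Pre_ excludes only the empty table, on which the Python A raises ValueError (and B raises TypeError).
def Pre_solution (table : List String) (languages : List String) (preference : List Int) : Prop :=
  table ≠ []
instance (table : List String) (languages : List String) (preference : List Int) : Decidable (Pre_solution table languages preference) := by unfold Pre_solution; infer_instance

def pvWitness_solution : List String × List String × List Int :=
  (["game python js", "web js sql"], ["python", "js"], [3, 2])

def Spec_solution (table : List String) (languages : List String) (preference : List Int) (out : String) : Prop := out = solution_alt table languages preference
instance (table : List String) (languages : List String) (preference : List Int) (out : String) : Decidable (Spec_solution table languages preference out) := by unfold Spec_solution; infer_instance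

-- ===== CLAIM (what is proved, stated in full; the proofs are below) =====
def Claim_equal_solution : Prop := ∀ (table : List String) (languages : List String) (preference : List Int), Dom_solution table languages preference → Pre_solution table languages preference → Spec_solution table languages preference (solution table languages preference)

-- ===== LEMMAS AND PROOFS =====

-- the final match of either port, as an Option projection
theorem pv_matchA (l : List (Int × String)) :
    (match l with | (_, b) :: _ => b | [] => "") = (l.head?.map Prod.snd).getD "" := by
  cases l with
  | nil => rfl
  | cons p t => cases p; rfl

theorem pv_matchB (o : Option (Int × String)) :
    (match o with | some b => b.2 | none => "") = (o.map Prod.snd).getD "" := by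
  cases o <;> rfl

-- xs[1:6] is the first five elements after the head
theorem pv_slice16 {alpha : Type} (xs : List alpha) :
    PySem.List.slice xs (some 1) (some 6) = (xs.tail).take 5 := by
  simp [pysem, List.drop_one]


-- ----- per-row weight: A's zip-dict lookup = B's countdown scan -----

-- the descending weight list k, k-1, … of length n
def pvDesc (k : Int) : Nat -> List Int
  | 0 => []
  | n + 1 => k :: pvDesc (k - 1) n

theorem pv_zip_take_left {alpha beta : Type} (xs : List alpha) (ws : List beta) :
    xs.zip ws = (xs.take ws.length).zip ws := by
  induction xs generalizing ws with
  | nil => simp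
  | cons x t ih =>
    cases ws with
    | nil => simp
    | cons w tw =>
      simp only [List.zip_cons_cons, List.length_cons, List.take_succ_cons]
      rw [ih tw]

theorem pv_zip_take_right {alpha beta : Type} (xs : List alpha) (ws : List beta) :
    xs.zip ws = xs.zip (ws.take xs.length) := by
  induction xs generalizing ws with
  | nil => simp
  | cons x t ih =>
    cases ws with
    | nil => simp
    | cons w tw =>
      simp only [List.zip_cons_cons, List.length_cons, List.take_succ_cons]
      rw [ih tw]

theorem pv_desc_take (n : Nat) : ∀ (m : Nat) (k : Int), m ≤ n → (pvDesc k n).take m = pvDesc k m := by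
  induction n with
  | zero => intro m k h; interval_cases m; rfl
  | succ n ih =>
    intro m k h
    cases m with
    | zero => rfl
    | succ m => simp only [pvDesc, List.take_succ_cons]; rw [ih m (k - 1) (by omega)]

-- dict built by an insert loop: lookup = last matching pair
theorem pv_get?_update (pairs : List (String × Int)) :
    ∀ (d : PySem.Dict String Int) (l : String),
    (pairs.foldl (fun d p => d.insert p.1 p.2) d).get? l
      = pairs.foldl (fun (acc : Option Int) p => if p.1 = l then some p.2 else acc) (d.get? l) := by
  induction pairs with
  | nil => intro d l; rfl
  | cons p t ih =>
    intro d l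
    simp only [List.foldl_cons]
    rw [ih]
    congr 1
    rw [PySem.Dict.get?_insert]
    by_cases h : p.1 = l
    · simp [h]
    · have h2 : ¬(l = p.1) := fun hh => h hh.symm
      simp [h, h2]

theorem pv_optfold_getD (pairs : List (String × Int)) :
    ∀ (o : Option Int) (w0 : Int) (l : String),
    (pairs.foldl (fun (acc : Option Int) p => if p.1 = l then some p.2 else acc) o).getD w0
      = pairs.foldl (fun (w : Int) p => if p.1 = l then p.2 else w) (o.getD w0) := by
  induction pairs with
  | nil => intro o w0 l; rfl
  | cons p t ih =>
    intro o w0 l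
    simp only [List.foldl_cons]
    rw [ih]
    congr 1
    by_cases h : p.1 = l <;> simp [h]

theorem pv_countdown (listed : List String) :
    ∀ (l : String) (k w0 : Int),
    (listed.foldl (fun (wk : Int × Int) tok => (if tok = l then wk.2 else wk.1, wk.2 - 1)) (w0, k)).1
      = (listed.zip (pvDesc k listed.length)).foldl (fun (w : Int) p => if p.1 = l then p.2 else w) w0 := by
  induction listed with
  | nil => intro l k w0; rfl
  | cons tok t ih =>
    intro l k w0
    simp only [List.length_cons, pvDesc, List.zip_cons_cons, List.foldl_cons]
    exact ih l (k - 1) (if tok = l then k else w0)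

theorem pv_weight (rest : List String) (l : String) :
    ((PySem.Dict.ofList (List.zip rest ([5, 4, 3, 2, 1] : List Int))).get? l).getD 0
      = ((rest.take 5).foldl (fun (wk : Int × Int) tok =>
          (if tok = l then wk.2 else wk.1, wk.2 - 1)) (0, 5)).1 := by
  have h1 : PySem.Dict.ofList (List.zip rest ([5, 4, 3, 2, 1] : List Int))
      = (List.zip rest ([5, 4, 3, 2, 1] : List Int)).foldl
          (fun d p => d.insert p.1 p.2) PySem.Dict.empty := rfl
  have hz : List.zip rest ([5, 4, 3, 2, 1] : List Int)
      = (rest.take 5).zip (pvDesc 5 (rest.take 5).length) := by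
    have h5 : ([5, 4, 3, 2, 1] : List Int) = pvDesc 5 5 := by decide
    rw [pv_zip_take_left rest ([5, 4, 3, 2, 1] : List Int)]
    have hlen : (([5, 4, 3, 2, 1] : List Int)).length = 5 := rfl
    rw [hlen, pv_zip_take_right (rest.take 5) ([5, 4, 3, 2, 1] : List Int), h5,
        pv_desc_take 5 (rest.take 5).length 5 (by simp [List.length_take])]
  rw [h1, pv_get?_update, pv_optfold_getD, PySem.Dict.get?_empty, Option.getD_none,
      pv_countdown, hz]

-- per-row score: A's loop over (language, preference) with the dict = B's with the countdown
theorem pv_score (languages : List String) (preference : List Int) (rest : List String) :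
    (List.zip languages preference).foldl (fun s lp =>
        s + (match (PySem.Dict.ofList (List.zip rest ([5, 4, 3, 2, 1] : List Int))).get? lp.1 with
             | some v => v * lp.2
             | none => 0)) 0
      = (List.zip languages preference).foldl (fun s lp =>
        s + ((rest.take 5).foldl (fun (wk : Int × Int) tok =>
              (if tok = lp.1 then wk.2 else wk.1, wk.2 - 1)) (0, 5)).1 * lp.2) 0 := by
  congr 1
  funext s lp
  congr 1
  rw [← pv_weight rest lp.1]
  cases (PySem.Dict.ofList (List.zip rest ([5, 4, 3, 2, 1] : List Int))).get? lp.1 <;> simp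

-- ----- selection: running best = min2? with keys (-score, name) -----

def pvMinStep (acc : Option (Int × String)) (x : Int × String) : Option (Int × String) :=
  match acc with
  | none => some x
  | some m => if x.1 > m.1 ∨ (x.1 = m.1 ∧ x.2 < m.2) then some x else some m

theorem pv_fold_minstep (l : List (Int × String)) :
    l.foldl pvMinStep none = PySem.List.min2? l (fun x => -x.1) (fun x => x.2) := by
  unfold PySem.List.min2?
  congr 1
  funext acc x
  cases acc with
  | none => rfl
  | some m =>
    show (if x.1 > m.1 ∨ (x.1 = m.1 ∧ x.2 < m.2) then some x else some m)
      = if (decide (-x.1 < -m.1) || (!decide (-m.1 < -x.1) && decide (x.2 < m.2))) = true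
        then some x else some m
    have hc : ((decide (-x.1 < -m.1) || (!decide (-m.1 < -x.1) && decide (x.2 < m.2))) = true)
        ↔ (x.1 > m.1 ∨ (x.1 = m.1 ∧ x.2 < m.2)) := by
      simp only [Bool.or_eq_true, Bool.and_eq_true, Bool.not_eq_true', decide_eq_true_eq,
        decide_eq_false_iff_not]
      constructor
      · rintro (h | ⟨h1, h2⟩)
        · exact Or.inl (by omega)
        · by_cases h3 : x.1 > m.1
          · exact Or.inl h3
          · exact Or.inr ⟨by omega, h2⟩
      · rintro (h | ⟨h1, h2⟩)
        · exact Or.inl (by omega)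
        · exact Or.inr ⟨by omega, h2⟩
    by_cases hp : x.1 > m.1 ∨ (x.1 = m.1 ∧ x.2 < m.2)
    · rw [if_pos hp, if_pos (hc.mpr hp)]
    · rw [if_neg hp, if_neg (fun hb => hp (hc.mp hb))]

-- what the running min is: member and lexicographically least by (-score, name)
def pvLe (m x : Int × String) : Prop := -m.1 < -x.1 ∨ (-m.1 = -x.1 ∧ m.2 ≤ x.2)

theorem pvLe_refl (m : Int × String) : pvLe m m := Or.inr ⟨rfl, le_refl _⟩

theorem pvLe_trans {a b c : Int × String} (h1 : pvLe a b) (h2 : pvLe b c) : pvLe a c := by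
  rcases h1 with h1 | ⟨h1, h1'⟩ <;> rcases h2 with h2 | ⟨h2, h2'⟩
  · exact Or.inl (lt_trans h1 h2)
  · exact Or.inl (by omega)
  · exact Or.inl (by omega)
  · exact Or.inr ⟨by omega, le_trans h1' h2'⟩

theorem pv_minstep_le (m : Int × String) (x : Int × String) :
    ∃ m1, pvMinStep (some m) x = some m1 ∧ (m1 = m ∨ m1 = x) ∧ pvLe m1 m ∧ pvLe m1 x := by
  by_cases h : x.1 > m.1 ∨ (x.1 = m.1 ∧ x.2 < m.2)
  · refine ⟨x, by simp only [pvMinStep]; rw [if_pos h], Or.inr rfl, ?_, pvLe_refl x⟩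
    rcases h with h | ⟨h1, h2⟩
    · exact Or.inl (by omega)
    · exact Or.inr ⟨by omega, le_of_lt h2⟩
  · refine ⟨m, by simp only [pvMinStep]; rw [if_neg h], Or.inl rfl, pvLe_refl m, ?_⟩
    rcases lt_trichotomy m.1 x.1 with h3 | h3 | h3
    · exact absurd (Or.inl h3) h
    · refine Or.inr ⟨by omega, ?_⟩
      by_cases h4 : x.2 < m.2
      · exact absurd (Or.inr ⟨h3.symm, h4⟩) h
      · exact le_of_not_gt h4
    · exact Or.inl (by omega)

theorem pv_minfold_go (l : List (Int × String)) :
    ∀ (m : Int × String),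
    ∃ m', l.foldl pvMinStep (some m) = some m' ∧ (m' = m ∨ m' ∈ l) ∧ pvLe m' m ∧ ∀ x ∈ l, pvLe m' x := by
  induction l with
  | nil => intro m; exact ⟨m, rfl, Or.inl rfl, pvLe_refl m, by simp⟩
  | cons x t ih =>
    intro m
    obtain ⟨m1, hm1, hmem1, hle1m, hle1x⟩ := pv_minstep_le m x
    obtain ⟨m', hm', hmem', hle'⟩ := ih m1
    refine ⟨m', by simpa [hm1] using hm', ?_, pvLe_trans hle'.1 hle1m, ?_⟩
    · rcases hmem' with h | h
      · rcases hmem1 with h1 | h1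
        · exact Or.inl (h.trans h1)
        · exact Or.inr (by simp [h, h1])
      · exact Or.inr (List.mem_cons_of_mem x h)
    · intro y hy
      rcases List.mem_cons.mp hy with h | h
      · exact pvLe_trans hle'.1 (h ▸ hle1x)
      · exact hle'.2 y h

theorem pv_minfold_spec (l : List (Int × String)) (h : l ≠ []) :
    ∃ m, l.foldl pvMinStep none = some m ∧ m ∈ l ∧ ∀ x ∈ l, pvLe m x := by
  cases l with
  | nil => exact absurd rfl h
  | cons x t =>
    obtain ⟨m', hm', hmem', hlex, hle'⟩ := pv_minfold_go t x
    refine ⟨m', hm', ?_, ?_⟩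
    · rcases hmem' with h1 | h1
      · exact h1 ▸ List.mem_cons_self
      · exact List.mem_cons_of_mem x h1
    · intro y hy
      rcases List.mem_cons.mp hy with h1 | h1
      · exact h1 ▸ hlex
      · exact hle' y h1

-- the running min over any two lists with the same members is the same pair
theorem pv_minfold_eq (l1 l2 : List (Int × String)) (h1 : l1 ≠ [])
    (hm : ∀ x, x ∈ l1 ↔ x ∈ l2) :
    l1.foldl pvMinStep none = l2.foldl pvMinStep none := by
  have h2 : l2 ≠ [] := by
    obtain ⟨y, hy⟩ := List.exists_mem_of_ne_nil l1 h1
    exact List.ne_nil_of_mem ((hm y).mp hy)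
  obtain ⟨m1, e1, mem1, le1⟩ := pv_minfold_spec l1 h1
  obtain ⟨m2, e2, mem2, le2⟩ := pv_minfold_spec l2 h2
  have h12 : pvLe m1 m2 := le1 m2 ((hm m2).mpr mem2)
  have h21 : pvLe m2 m1 := le2 m1 ((hm m1).mp mem1)
  have : m1 = m2 := by
    rcases h12 with h | ⟨ha, hb⟩ <;> rcases h21 with h' | ⟨ha', hb'⟩
    · omega
    · omega
    · omega
    · exact Prod.ext (by omega) (le_antisymm hb hb')
  rw [e1, e2, this]

-- ----- A's dict of departments: lookup = last row with that name -----

theorem pv_get?_foldl_insert (nm : String → String) (v : String → PySem.Dict String Int)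
    (ts : List String) :
    ∀ (d : PySem.Dict String (PySem.Dict String Int)) (n : String),
    (ts.foldl (fun d t => d.insert (nm t) (v t)) d).get? n
      = match ts.reverse.find? (fun r => nm r == n) with
        | some r => some (v r)
        | none => d.get? n := by
  induction ts with
  | nil => intro d n; rfl
  | cons t ts ih =>
    intro d n
    simp only [List.foldl_cons, List.reverse_cons, List.find?_append]
    rw [ih]
    cases hf : ts.reverse.find? (fun r => nm r == n) with
    | some r => rfl
    | none =>
      simp only [Option.none_or]
      show _ = match (List.find? (fun r => nm r == n) [t]) with
        | some r => some (v r) | none => d.get? n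
      rw [List.find?_cons]
      rw [PySem.Dict.get?_insert]
      by_cases h : nm t = n
      · simp [h]
      · have : (nm t == n) = false := by simp [h]
        have h2 : ¬(n = nm t) := fun hh => h hh.symm
        simp [this, h2]

-- ----- B's backward scan with the seen-set: the rows it keeps -----

def pvProc (nm : String → String) (sc : String → Int) :
    PySem.Set String → List String → List (Int × String)
  | _, [] => []
  | seen, r :: rs =>
      if PySem.Set.contains seen (nm r) then pvProc nm sc seen rs
      else (sc r, nm r) :: pvProc nm sc (PySem.Set.add seen (nm r)) rs

theorem pv_fold_proc (nm : String → String) (sc : String → Int) (rs : List String) :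
    ∀ (seen : PySem.Set String) (best : Option (Int × String)),
    (rs.foldl (fun (st : PySem.Set String × Option (Int × String)) row =>
        if PySem.Set.contains st.1 (nm row) then st
        else (PySem.Set.add st.1 (nm row),
          match st.2 with
          | none => some (sc row, nm row)
          | some (bs, bn) =>
              if sc row > bs ∨ (sc row = bs ∧ nm row < bn) then some (sc row, nm row)
              else some (bs, bn)))
      (seen, best)).2
    = (pvProc nm sc seen rs).foldl pvMinStep best := by
  induction rs with
  | nil => intro seen best; rfl
  | cons r rs ih =>
    intro seen best
    simp only [List.foldl_cons, pvProc]
    by_cases h : PySem.Set.contains seen (nm r)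
    · rw [if_pos h, if_pos h]; exact ih seen best
    · rw [if_neg h, if_neg h]
      simp only [List.foldl_cons]
      have : pvMinStep best (sc r, nm r)
          = match best with
            | none => some (sc r, nm r)
            | some (bs, bn) =>
                if sc r > bs ∨ (sc r = bs ∧ nm r < bn) then some (sc r, nm r) else some (bs, bn) := by
        cases best with
        | none => rfl
        | some m => cases m; rfl
      rw [← this]
      exact ih (PySem.Set.add seen (nm r)) (pvMinStep best (sc r, nm r))

theorem pv_mem_proc (nm : String → String) (sc : String → Int) (rs : List String) :
    ∀ (seen : PySem.Set String) (x : Int × String),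
    x ∈ pvProc nm sc seen rs
      ↔ (x.2 ∉ seen ∧ ∃ r, rs.find? (fun r' => nm r' == x.2) = some r ∧ x.1 = sc r) := by
  induction rs with
  | nil => intro seen x; simp [pvProc]
  | cons r rs ih =>
    intro seen x
    simp only [pvProc]
    by_cases hc : PySem.Set.contains seen (nm r)
    · rw [if_pos hc]
      have hmem : nm r ∈ seen := List.contains_iff_mem.mp hc
      rw [ih seen x, List.find?_cons]
      by_cases hb : nm r = x.2
      · have : (nm r == x.2) = true := by simp [hb]
        simp only [this]
        constructor
        · rintro ⟨hns, _⟩; exact absurd (hb ▸ hmem) hns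
        · rintro ⟨hns, _⟩; exact absurd (hb ▸ hmem) hns
      · have : (nm r == x.2) = false := by simp [hb]
        simp only [this]
    · rw [if_neg hc]
      have hns : nm r ∉ seen := fun hh => hc (List.contains_iff_mem.mpr hh)
      rw [List.mem_cons, ih (PySem.Set.add seen (nm r)) x, List.find?_cons]
      by_cases hb : nm r = x.2
      · have hbt : (nm r == x.2) = true := by simp [hb]
        simp only [hbt]
        constructor
        · rintro (h | ⟨hnadd, _⟩)
          · exact ⟨hb ▸ hns, r, rfl, by rw [h]⟩
          · exact absurd ((PySem.Set.mem_add seen (nm r) x.2).mpr (Or.inr hb.symm)) hnadd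
        · rintro ⟨_, r', hr', hx⟩
          injection hr' with hr'
          subst hr'
          exact Or.inl (Prod.ext hx hb.symm)
      · have hbf : (nm r == x.2) = false := by simp [hb]
        simp only [hbf]
        constructor
        · rintro (h | ⟨hnadd, hr⟩)
          · exact absurd (congrArg Prod.snd h) (by simpa using fun hh : x.2 = nm r => hb hh.symm)
          · exact ⟨fun hh => hnadd ((PySem.Set.mem_add seen (nm r) x.2).mpr (Or.inl hh)), hr⟩
        · rintro ⟨hnseen, hr⟩
          refine Or.inr ⟨fun hh => ?_, hr⟩
          rcases (PySem.Set.mem_add seen (nm r) x.2).mp hh with h | h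
          · exact hnseen h
          · exact hb h.symm

-- ----- head of A's sort = the running min -----

theorem pv_head?_insertBy {alpha : Type} (lt : alpha → alpha → Bool) (x : alpha) (ys : List alpha) :
    (PySem.List.insertBy lt x ys).head? =
      (match ys.head? with
       | none => some x
       | some m => if lt x m then some x else some m) := by
  cases ys with
  | nil => simp [PySem.List.insertBy]
  | cons m t =>
      by_cases h : lt x m
      · simp [PySem.List.insertBy, h]
      · simp [PySem.List.insertBy, h]

theorem pv_head?_foldl_insertBy {alpha : Type} (lt : alpha → alpha → Bool) (xs : List alpha) (acc : List alpha) :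
    (xs.foldl (fun acc x => PySem.List.insertBy lt x acc) acc).head? =
      xs.foldl (fun o x =>
        match o with
        | none => some x
        | some m => if lt x m then some x else some m) acc.head? := by
  induction xs generalizing acc with
  | nil => rfl
  | cons x t ih =>
      simp only [List.foldl_cons]
      rw [ih, pv_head?_insertBy]

theorem pv_head?_sorted2 {alpha : Type} (xs : List alpha) (k1 : alpha → Int) (k2 : alpha → String) :
    (PySem.List.sorted2 xs k1 k2 false).head? = PySem.List.min2? xs k1 k2 := by
  unfold PySem.List.sorted2 PySem.List.min2?
  simpa using pv_head?_foldl_insertBy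
    (fun a b => decide (k1 a < k1 b) || (!decide (k1 b < k1 a) && decide (k2 a < k2 b))) xs []

-- ----- the master lemma: whole pipeline, row parsing abstracted -----

theorem pv_master (nm : String → String) (scD scB : String → Int) (table : List String)
    (D : PySem.Dict String (PySem.Dict String Int))
    (hkeys : ∀ n, n ∈ D.keys ↔ (table.reverse.find? (fun r => nm r == n)).isSome)
    (hsc : ∀ n r, table.reverse.find? (fun r => nm r == n) = some r → scD n = scB r)
    (hne : table ≠ []) :
    (match PySem.List.sorted2 (D.keys.foldl (fun sc dept => sc ++ [(scD dept, dept)]) [])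
        (fun x => -x.1) (fun x => x.2) with
     | (_, b) :: _ => b
     | [] => "")
    = (match (table.reverse.foldl (fun (st : PySem.Set String × Option (Int × String)) row =>
        if PySem.Set.contains st.1 (nm row) then st
        else (PySem.Set.add st.1 (nm row),
          match st.2 with
          | none => some (scB row, nm row)
          | some (bs, bn) =>
              if scB row > bs ∨ (scB row = bs ∧ nm row < bn) then some (scB row, nm row)
              else some (bs, bn)))
        (PySem.Set.empty, none)).2 with
       | some b => b.2
       | none => "") := by
  rw [pv_matchA, pv_matchB,
      PySem.List.foldl_append_singleton_eq_map (fun dept => ((scD dept : Int), dept)) D.keys [],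
      List.nil_append, pv_head?_sorted2, ← pv_fold_minstep,
      pv_fold_proc nm scB table.reverse PySem.Set.empty none]
  have hLA : D.keys.map (fun n => (scD n, n)) ≠ [] := by
    obtain ⟨t, ht⟩ := List.exists_mem_of_ne_nil table hne
    have : nm t ∈ D.keys := (hkeys (nm t)).mpr
      (List.find?_isSome.mpr ⟨t, List.mem_reverse.mpr ht, by simp⟩)
    exact List.ne_nil_of_mem (List.mem_map_of_mem this)
  have hmem : ∀ x, x ∈ D.keys.map (fun n => ((scD n : Int), n))
      ↔ x ∈ pvProc nm scB PySem.Set.empty table.reverse := by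
    intro x
    rw [pv_mem_proc]
    constructor
    · intro hx
      obtain ⟨n, hn, he⟩ := List.mem_map.mp hx
      obtain ⟨r, hr⟩ := Option.isSome_iff_exists.mp ((hkeys n).mp hn)
      subst he
      exact ⟨by simp [PySem.Set.empty], r, hr, hsc n r hr⟩
    · rintro ⟨_, r, hr, hx1⟩
      refine List.mem_map.mpr ⟨x.2, (hkeys x.2).mpr (by rw [hr]; rfl), ?_⟩
      have := hsc x.2 r hr
      exact Prod.ext (by omega) rfl
  rw [pv_minfold_eq _ _ hLA hmem]

-- ===== VERDICT (by name: the statement is the Claim_ definition above) =====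
theorem solution_spec : Claim_equal_solution := by
  intro table languages preference _ hpre
  show solution table languages preference = solution_alt table languages preference
  unfold solution solution_alt
  simp only [pv_slice16]
  have hD : ∀ (n : String),
      (table.foldl (fun d t =>
        d.insert (((PySem.Str.split? t " ").getD []).headD "")
          (PySem.Dict.ofList (List.zip ((PySem.Str.split? t " ").getD []).tail ([5, 4, 3, 2, 1] : List Int))))
        PySem.Dict.empty).get? n
      = match table.reverse.find? (fun r => ((PySem.Str.split? r " ").getD []).headD "" == n) with
        | some r => some (PySem.Dict.ofList (List.zip ((PySem.Str.split? r " ").getD []).tail ([5, 4, 3, 2, 1] : List Int)))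
        | none => (PySem.Dict.empty : PySem.Dict String (PySem.Dict String Int)).get? n :=
    pv_get?_foldl_insert
      (fun t => ((PySem.Str.split? t " ").getD []).headD "")
      (fun t => PySem.Dict.ofList (List.zip ((PySem.Str.split? t " ").getD []).tail ([5, 4, 3, 2, 1] : List Int)))
      table PySem.Dict.empty
  refine pv_master (fun t => ((PySem.Str.split? t " ").getD []).headD "") _ _ table _ ?_ ?_ hpre
  · -- keys of the insert loop = names that occur in the table
    intro n
    have hiff : ∀ (dd : PySem.Dict String (PySem.Dict String Int)) (n : String),
        n ∈ dd.keys ↔ dd.get? n ≠ none := by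
      intro dd n
      rw [Ne, PySem.Dict.get?_eq_none_iff_not_mem_keys]
      exact not_not.symm
    rw [hiff, hD n]
    cases table.reverse.find? (fun r => ((PySem.Str.split? r " ").getD []).headD "" == n) <;>
      simp [PySem.Dict.get?_empty]
  · -- the scored dict of a department = its last row; then the per-row score lemma
    intro n r hfind
    replace hfind : table.reverse.find?
        (fun r => ((PySem.Str.split? r " ").getD []).headD "" == n) = some r := hfind
    have hget : (table.foldl (fun d t =>
        d.insert (((PySem.Str.split? t " ").getD []).headD "")
          (PySem.Dict.ofList (List.zip ((PySem.Str.split? t " ").getD []).tail ([5, 4, 3, 2, 1] : List Int))))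
        PySem.Dict.empty).getD n PySem.Dict.empty
        = PySem.Dict.ofList (List.zip ((PySem.Str.split? r " ").getD []).tail ([5, 4, 3, 2, 1] : List Int)) := by
      rw [PySem.Dict.getD_eq_get?_getD, hD n, hfind]
      rfl
    rw [hget]
    exact pv_score languages preference (((PySem.Str.split? r " ").getD []).tail)
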